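-- pv_equiv track=rewrite | github.com/stoffee/fulcrum_tracker | custom_components/fulcrum_tracker/api/google_calendar.py | _deduplicate_sessions
-- ===== SOURCE A (Python) =====
-- from typing import Any, Dict, List, Optional
--
-- def _deduplicate_sessions(sessions: List[Dict[str, Any]]) -> List[Dict[str, Any]]:
--     """Remove duplicate sessions while preserving order."""
--     unique_sessions = []
--     seen = set()
--
--     for session in sorted(sessions, key=lambda x: (x['date'], x['time'])):
--         key = f"{session['date']}_{session['time']}"
--         if key not in seen:
--             unique_sessions.append(session)
--             seen.add(key)
--
--     return unique_sessions
-- ===== SOURCE B (Python) =====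
-- from typing import Any, Dict, List, Optional
--
-- def _deduplicate_sessions(sessions: List[Dict[str, Any]]) -> List[Dict[str, Any]]:
--     """Remove duplicate sessions while preserving order."""
--     result = []
--     prev_key = None
--     for session in sorted(sessions, key=lambda x: (x['date'], x['time'])):
--         key = (session['date'], session['time'])
--         if key != prev_key:
--             result.append(session)
--             prev_key = key
--     return result
-- ===== Notes on version B (the rewrite author's own statement) =====
-- stated objective: simpler
-- what changed: B drops A's seen-set of joined date_time strings entirely: after the same sort it does an adjacency scan keeping one prev (date, time) pair and appends a session only when its pair differs from the previous appended one, deduplicating by the (date, time) pair instead of the underscore-joined string.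
-- intended difference: On inputs containing two sessions with distinct (date, time) pairs whose joined strings collide (an underscore inside a date or time makes f"{date}_{time}" ambiguous), A merges the distinct pairs and returns only the first, while B keeps one session per distinct (date, time) pair, which is the intended dedup key. — e.g. on _deduplicate_sessions([[("date", "a"), ("time", "b_c")], [("date", "a_b"), ("time", "c")]]): A returns [[("date", "a"), ("time", "b_c")]], B returns [[("date", "a"), ("time", "b_c")], [("date", "a_b"), ("time", "c")]]
import Mathlib
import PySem

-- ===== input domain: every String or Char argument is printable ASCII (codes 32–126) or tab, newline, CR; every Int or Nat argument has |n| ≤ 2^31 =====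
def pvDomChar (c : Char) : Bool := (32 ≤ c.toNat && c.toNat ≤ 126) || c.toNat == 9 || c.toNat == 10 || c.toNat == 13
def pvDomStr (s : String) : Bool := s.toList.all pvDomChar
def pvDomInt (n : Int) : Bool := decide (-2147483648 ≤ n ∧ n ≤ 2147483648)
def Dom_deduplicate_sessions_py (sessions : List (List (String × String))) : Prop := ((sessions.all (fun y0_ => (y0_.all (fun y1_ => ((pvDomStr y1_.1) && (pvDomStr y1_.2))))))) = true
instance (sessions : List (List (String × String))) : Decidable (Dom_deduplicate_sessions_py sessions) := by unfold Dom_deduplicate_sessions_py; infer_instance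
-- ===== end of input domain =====

-- B replaces A's seen-set of joined "date_time" strings by an adjacency scan of the sorted list with one
-- prev-key variable keyed on the (date, time) pair (simpler control flow, one scalar instead of a set);
-- on underscore-ambiguous inputs A merges distinct (date, time) pairs and B keeps them (see D_ below).


-- x['date'] / x['time'] on a session dict; total via a default, faithful under Pre_ (keys present)
def pvDate (s : List (String × String)) : String := (PySem.Dict.mk s).getD "date" ""
def pvTime (s : List (String × String)) : String := (PySem.Dict.mk s).getD "time" ""
-- A's dedup key f"{date}_{time}" and B's dedup key (date, time)
def pvJKey (s : List (String × String)) : String := pvDate s ++ "_" ++ pvTime s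
def pvKey (s : List (String × String)) : String × String := (pvDate s, pvTime s)

-- ===== PORT A =====
def deduplicate_sessions_py (sessions : List (List (String × String))) : List (List (String × String)) :=
  ((PySem.List.sorted2 sessions pvDate pvTime).foldl
    (fun (st : List (List (String × String)) × PySem.Set String) session =>
      if PySem.Set.contains st.2 (pvJKey session) then st
      else (st.1 ++ [session], PySem.Set.add st.2 (pvJKey session)))
    ([], PySem.Set.empty)).1

-- ===== PORT B =====
-- the loop: keep a session exactly when its (date, time) pair differs from the last appended one
def pvDedupAdj : Option (String × String) → List (List (String × String)) → List (List (String × String))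
  | _, [] => []
  | prev, s :: t =>
      if some (pvKey s) = prev then pvDedupAdj prev t
      else s :: pvDedupAdj (some (pvKey s)) t

def deduplicate_sessions_py_alt (sessions : List (List (String × String))) : List (List (String × String)) :=
  pvDedupAdj none (PySem.List.sorted2 sessions pvDate pvTime)

-- ===== PRECONDITION & SPEC =====
-- Pre_ excludes exactly the sessions missing a 'date' or 'time' key, on which the Python A raises KeyError.
def Pre_deduplicate_sessions_py (sessions : List (List (String × String))) : Prop :=
  ∀ s ∈ sessions, ("date" ∈ s.map Prod.fst) ∧ ("time" ∈ s.map Prod.fst)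
instance (sessions : List (List (String × String))) : Decidable (Pre_deduplicate_sessions_py sessions) := by
  unfold Pre_deduplicate_sessions_py; infer_instance

def pvWitness_deduplicate_sessions_py : (List (List (String × String))) :=
  [[("date", "2024-01-01"), ("time", "10:00")], [("date", "2024-01-01"), ("time", "10:00")]]

-- On inputs holding two sessions with distinct (date, time) pairs whose "date_time" joins collide
-- (an underscore in a date/time making the separator ambiguous), A merges the distinct pairs into one
-- session while B keeps one session per distinct (date, time) pair, which is the intended dedup key.
def D_deduplicate_sessions_py (sessions : List (List (String × String))) : Prop :=
  ∃ x ∈ sessions, ∃ y ∈ sessions, (pvDate x ≠ pvDate y ∨ pvTime x ≠ pvTime y) ∧ pvJKey x = pvJKey y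
instance (sessions : List (List (String × String))) : Decidable (D_deduplicate_sessions_py sessions) := by
  unfold D_deduplicate_sessions_py; infer_instance

def Spec_deduplicate_sessions_py (sessions : List (List (String × String))) (out : List (List (String × String))) : Prop := ¬ D_deduplicate_sessions_py sessions → out = deduplicate_sessions_py_alt sessions
instance (sessions : List (List (String × String))) (out : List (List (String × String))) : Decidable (Spec_deduplicate_sessions_py sessions out) := by unfold Spec_deduplicate_sessions_py; infer_instance

def pvDiffWitness_deduplicate_sessions_py : (List (List (String × String))) :=
  [[("date", "a"), ("time", "b_c")], [("date", "a_b"), ("time", "c")]]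
def pvDiffWitnessOut_deduplicate_sessions_py : (List (List (String × String))) × (List (List (String × String))) :=
  ([[("date", "a"), ("time", "b_c")]],
   [[("date", "a"), ("time", "b_c")], [("date", "a_b"), ("time", "c")]])

-- ===== CLAIM (what is proved, stated in full; the proofs are below) =====
def Claim_unchanged_deduplicate_sessions_py : Prop := ∀ (sessions : List (List (String × String))), Dom_deduplicate_sessions_py sessions → Pre_deduplicate_sessions_py sessions → Spec_deduplicate_sessions_py sessions (deduplicate_sessions_py sessions)
def Claim_changed_deduplicate_sessions_py : Prop := Dom_deduplicate_sessions_py (pvDiffWitness_deduplicate_sessions_py) ∧ Pre_deduplicate_sessions_py (pvDiffWitness_deduplicate_sessions_py) ∧ D_deduplicate_sessions_py (pvDiffWitness_deduplicate_sessions_py) ∧ deduplicate_sessions_py (pvDiffWitness_deduplicate_sessions_py) = pvDiffWitnessOut_deduplicate_sessions_py.1 ∧ deduplicate_sessions_py_alt (pvDiffWitness_deduplicate_sessions_py) = pvDiffWitnessOut_deduplicate_sessions_py.2 ∧ pvDiffWitnessOut_deduplicate_sessions_py.1 ≠ pvDiffWitnessOut_deduplicate_sessions_py.2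

def Claim_exact_deduplicate_sessions_py : Prop := ∀ (sessions : List (List (String × String))), Dom_deduplicate_sessions_py sessions → Pre_deduplicate_sessions_py sessions → D_deduplicate_sessions_py sessions → deduplicate_sessions_py sessions ≠ deduplicate_sessions_py_alt sessions

-- ===== LEMMAS AND PROOFS =====

-- the strict lexicographic comparison sorted2 sorts by, on the (date, time) pairs
def pvLt (p q : String × String) : Bool :=
  decide (p.1 < q.1) || (!decide (q.1 < p.1) && decide (p.2 < q.2))

lemma pvLt_iff (p q : String × String) :
    pvLt p q = true ↔ (p.1 < q.1 ∨ (¬ q.1 < p.1 ∧ p.2 < q.2)) := by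
  simp [pvLt]

lemma pvLt_irrefl (p : String × String) : pvLt p p = false := by
  simp [pvLt]

lemma pvLt_trans (p q r : String × String) (h1 : pvLt p q = true) (h2 : pvLt q r = true) :
    pvLt p r = true := by
  rw [pvLt_iff] at *
  rcases h1 with h1 | ⟨h1a, h1b⟩ <;> rcases h2 with h2 | ⟨h2a, h2b⟩
  · exact Or.inl (lt_trans h1 h2)
  · exact Or.inl (lt_of_lt_of_le h1 (not_lt.mp h2a))
  · exact Or.inl (lt_of_le_of_lt (not_lt.mp h1a) h2)
  · exact Or.inr ⟨fun h => h1a (lt_of_le_of_lt (not_lt.mp h2a) h), lt_trans h1b h2b⟩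

lemma pvLt_antisymm (p q : String × String) (h1 : pvLt p q = false) (h2 : pvLt q p = false) :
    p = q := by
  have h1' : ¬ pvLt p q = true := by simp [h1]
  have h2' : ¬ pvLt q p = true := by simp [h2]
  rw [pvLt_iff] at h1' h2'
  rcases p with ⟨p1, p2⟩; rcases q with ⟨q1, q2⟩
  simp only at h1' h2'
  have hnp1 : ¬ p1 < q1 := fun h => h1' (Or.inl h)
  have hnq1 : ¬ q1 < p1 := fun h => h2' (Or.inl h)
  have hnp2 : ¬ p2 < q2 := fun h => h1' (Or.inr ⟨hnq1, h⟩)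
  have hnq2 : ¬ q2 < p2 := fun h => h2' (Or.inr ⟨hnp1, h⟩)
  rw [Prod.mk.injEq]
  exact ⟨le_antisymm (not_lt.mp hnq1) (not_lt.mp hnp1),
         le_antisymm (not_lt.mp hnq2) (not_lt.mp hnp2)⟩

-- insertBy with a transitive irreflexive comparison preserves sortedness
lemma pv_insertBy_pairwise {α : Type} (before : α → α → Bool)
    (htr : ∀ a b c, before a b = true → before b c = true → before a c = true)
    (hirr : ∀ a, before a a = false)
    (x : α) (l : List α) (h : l.Pairwise (fun a b => before b a = false)) :
    (PySem.List.insertBy before x l).Pairwise (fun a b => before b a = false) := by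
  induction l with
  | nil => simp [PySem.List.insertBy]
  | cons y ys ih =>
    rcases List.pairwise_cons.mp h with ⟨hy, hys⟩
    by_cases hb : before x y = true
    · simp only [PySem.List.insertBy, hb, if_true]
      refine List.pairwise_cons.mpr ⟨?_, h⟩
      intro z hz
      rcases List.mem_cons.mp hz with hz | hz
      · rw [hz]
        by_contra hc
        have hyx : before y x = true := by revert hc; cases before y x <;> simp
        have := htr y x y hyx hb
        simp [hirr] at this
      · by_contra hc
        have hzx : before z x = true := by revert hc; cases before z x <;> simp
        have := htr z x y hzx hb
        simp [hy z hz] at this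
    · have hb' : before x y = false := by revert hb; cases before x y <;> simp
      simp only [PySem.List.insertBy, hb', Bool.false_eq_true, if_false]
      refine List.pairwise_cons.mpr ⟨?_, ih hys⟩
      intro z hz
      rcases (PySem.List.mem_insertBy before x z ys).mp hz with hz | hz
      · subst hz; exact hb'
      · exact hy z hz

lemma pv_foldl_insertBy_pairwise {α : Type} (before : α → α → Bool)
    (htr : ∀ a b c, before a b = true → before b c = true → before a c = true)
    (hirr : ∀ a, before a a = false)
    (xs acc : List α) (h : acc.Pairwise (fun a b => before b a = false)) :
    (xs.foldl (fun acc x => PySem.List.insertBy before x acc) acc).Pairwise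
      (fun a b => before b a = false) := by
  induction xs generalizing acc with
  | nil => exact h
  | cons x t ih => exact ih _ (pv_insertBy_pairwise before htr hirr x acc h)

lemma pv_sorted2_pairwise (xs : List (List (String × String))) :
    (PySem.List.sorted2 xs pvDate pvTime).Pairwise
      (fun a b => pvLt (pvKey b) (pvKey a) = false) := by
  have : PySem.List.sorted2 xs pvDate pvTime
      = xs.foldl (fun acc x => PySem.List.insertBy
          (fun a b => pvLt (pvKey a) (pvKey b)) x acc) [] := rfl
  rw [this]
  exact pv_foldl_insertBy_pairwise _
    (fun a b c => pvLt_trans (pvKey a) (pvKey b) (pvKey c))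
    (fun a => pvLt_irrefl (pvKey a)) xs [] (by simp)

lemma pv_key_eq_jkey_eq {x y : List (String × String)} (h : pvKey x = pvKey y) :
    pvJKey x = pvJKey y := by
  unfold pvKey at h
  unfold pvJKey
  rw [(Prod.mk.injEq _ _ _ _).mp h |>.1, (Prod.mk.injEq _ _ _ _).mp h |>.2]

-- loop invariant: A's fold over the tail, started from (u, S), appends exactly B's adjacency dedup
lemma pv_main (l : List (List (String × String)))
    (u : List (List (String × String))) (S : PySem.Set String)
    (prev : Option (String × String))
    (hpair : l.Pairwise (fun a b => pvLt (pvKey b) (pvKey a) = false))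
    (hnc : ∀ x ∈ l, ∀ y ∈ l, pvJKey x = pvJKey y → pvKey x = pvKey y)
    (hseen : ∀ x ∈ l, (PySem.Set.contains S (pvJKey x) = true ↔ some (pvKey x) = prev))
    (hprev : ∀ p, prev = some p → ∀ x ∈ l, pvLt (pvKey x) p = false) :
    (l.foldl
      (fun (st : List (List (String × String)) × PySem.Set String) session =>
        if PySem.Set.contains st.2 (pvJKey session) then st
        else (st.1 ++ [session], PySem.Set.add st.2 (pvJKey session)))
      (u, S)).1 = u ++ pvDedupAdj prev l := by
  induction l generalizing u S prev with
  | nil => simp [pvDedupAdj]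
  | cons s t ih =>
    rcases List.pairwise_cons.mp hpair with ⟨hhd, htl⟩
    simp only [List.foldl_cons, pvDedupAdj]
    by_cases hc : PySem.Set.contains S (pvJKey s) = true
    · have hps : some (pvKey s) = prev := (hseen s (by simp)).mp hc
      rw [if_pos hc, if_pos hps]
      exact ih u S prev htl
        (fun x hx y hy => hnc x (by simp [hx]) y (by simp [hy]))
        (fun x hx => hseen x (by simp [hx]))
        (fun p hp x hx => hprev p hp x (by simp [hx]))
    · have hc' : PySem.Set.contains S (pvJKey s) = false := by
        revert hc; cases PySem.Set.contains S (pvJKey s) <;> simp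
      have hps : ¬ some (pvKey s) = prev := fun h => hc ((hseen s (by simp)).mpr h)
      rw [if_neg hc, if_neg hps]
      have hrec := ih (u ++ [s]) (PySem.Set.add S (pvJKey s)) (some (pvKey s)) htl
        (fun x hx y hy => hnc x (by simp [hx]) y (by simp [hy]))
        ?_ ?_
      · rw [hrec, List.append_assoc]; rfl
      · intro x hx
        have hnotS : ¬ pvJKey x ∈ S := by
          intro hmem
          have hx' : PySem.Set.contains S (pvJKey x) = true := (PySem.Set.contains_iff S (pvJKey x)).mpr hmem
          have := (hseen x (by simp [hx])).mp hx'
          rcases prev with _ | p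
          · exact (Option.some_ne_none _ this).elim
          · have hpx : pvKey x = p := Option.some.inj this
            have h1 : pvLt (pvKey s) p = false := hprev p rfl s (by simp)
            have h2 : pvLt p (pvKey s) = false := hpx ▸ hhd x hx
            exact hps (by rw [pvLt_antisymm _ _ h1 h2])
        constructor
        · intro hcon
          have hmem := (PySem.Set.contains_iff _ _).mp hcon
          rcases (PySem.Set.mem_add _ _ _).mp hmem with hmem | hmem
          · exact absurd hmem hnotS
          · exact congrArg some (hnc x (by simp [hx]) s (by simp) hmem)
        · intro hk
          have : pvJKey x = pvJKey s := pv_key_eq_jkey_eq (Option.some.inj hk)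
          exact (PySem.Set.contains_iff _ _).mpr ((PySem.Set.mem_add _ _ _).mpr (Or.inr this))
      · intro p hp x hx
        rw [← Option.some.inj hp]
        exact hhd x hx

-- ===== VERDICT (by name: the statement is the Claim_ definition above) =====
theorem deduplicate_sessions_py_spec : Claim_unchanged_deduplicate_sessions_py := by
  intro sessions _ _ hnd
  unfold deduplicate_sessions_py deduplicate_sessions_py_alt
  have hperm := PySem.List.sorted2_perm sessions pvDate pvTime false
  have hnc : ∀ x ∈ PySem.List.sorted2 sessions pvDate pvTime, ∀ y ∈ PySem.List.sorted2 sessions pvDate pvTime,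
      pvJKey x = pvJKey y → pvKey x = pvKey y := by
    intro x hx y hy hj
    by_contra hne
    refine hnd ⟨x, hperm.mem_iff.mp hx, y, hperm.mem_iff.mp hy, ?_, hj⟩
    by_contra hdt
    push Not at hdt
    exact hne (by unfold pvKey; rw [hdt.1, hdt.2])
  have := pv_main (PySem.List.sorted2 sessions pvDate pvTime) [] PySem.Set.empty none
    (pv_sorted2_pairwise sessions) hnc
    (by intro x hx; simp [PySem.Set.empty])
    (by intro p hp; simp at hp)
  simpa using this

lemma pv_sorted2_W :
    PySem.List.sorted2 pvDiffWitness_deduplicate_sessions_py pvDate pvTime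
      = pvDiffWitness_deduplicate_sessions_py := by
  have h1 : pvDate [("date", "a"), ("time", "b_c")] = "a" := by decide
  have h2 : pvDate [("date", "a_b"), ("time", "c")] = "a_b" := by decide
  simp [PySem.List.sorted2, pvDiffWitness_deduplicate_sessions_py, PySem.List.insertBy, h1, h2]

-- A's loop only appends a session whose joined key is unseen, so A's output has pairwise-distinct joined keys
lemma pv_A_map_nodup (l : List (List (String × String)))
    (u : List (List (String × String))) (S : PySem.Set String)
    (hu : ∀ x ∈ u, pvJKey x ∈ S) (hnd : (u.map pvJKey).Nodup) :
    (((l.foldl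
      (fun (st : List (List (String × String)) × PySem.Set String) session =>
        if PySem.Set.contains st.2 (pvJKey session) then st
        else (st.1 ++ [session], PySem.Set.add st.2 (pvJKey session)))
      (u, S)).1).map pvJKey).Nodup := by
  induction l generalizing u S with
  | nil => exact hnd
  | cons s t ih =>
    simp only [List.foldl_cons]
    by_cases hc : PySem.Set.contains S (pvJKey s) = true
    · rw [if_pos hc]; exact ih u S hu hnd
    · rw [if_neg hc]
      refine ih (u ++ [s]) (PySem.Set.add S (pvJKey s)) ?_ ?_
      · intro x hx
        rcases List.mem_append.mp hx with hx | hx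
        · exact (PySem.Set.mem_add _ _ _).mpr (Or.inl (hu x hx))
        · rw [List.mem_singleton.mp hx]
          exact (PySem.Set.mem_add _ _ _).mpr (Or.inr rfl)
      · rw [List.map_append]
        refine List.Nodup.append hnd (List.nodup_singleton _) ?_
        intro a ha hb
        rcases List.mem_map.mp ha with ⟨x, hxu, hax⟩
        rw [List.mem_singleton.mp hb] at hax
        exact hc ((PySem.Set.contains_iff _ _).mpr (hax ▸ hu x hxu))

-- every (date, time) pair occurring in the list is represented in B's adjacency dedup
lemma pv_B_repr (l : List (List (String × String)))
    (prev : Option (String × String)) (z : List (String × String)) (hz : z ∈ l) :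
    some (pvKey z) = prev ∨ ∃ w ∈ pvDedupAdj prev l, pvKey w = pvKey z := by
  induction l generalizing prev with
  | nil => cases hz
  | cons s t ih =>
    by_cases hs : some (pvKey s) = prev
    · rw [show pvDedupAdj prev (s :: t) = pvDedupAdj prev t by
        simp only [pvDedupAdj, if_pos hs]]
      rcases List.mem_cons.mp hz with hz | hz
      · exact Or.inl (hz ▸ hs)
      · exact ih prev hz
    · rw [show pvDedupAdj prev (s :: t) = s :: pvDedupAdj (some (pvKey s)) t by
        simp only [pvDedupAdj, if_neg hs]]
      rcases List.mem_cons.mp hz with hz | hz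
      · exact Or.inr ⟨s, List.mem_cons_self, by rw [hz]⟩
      · rcases ih (some (pvKey s)) hz with hk | ⟨w, hw, hwk⟩
        · exact Or.inr ⟨s, List.mem_cons_self, (Option.some.inj hk).symm⟩
        · exact Or.inr ⟨w, List.mem_cons_of_mem _ hw, hwk⟩

theorem deduplicate_sessions_py_tight : Claim_exact_deduplicate_sessions_py := by
  intro sessions _ _ hD heq
  rcases hD with ⟨x, hx, y, hy, hkne, hjeq⟩
  have hperm := PySem.List.sorted2_perm sessions pvDate pvTime false
  have hxL : x ∈ PySem.List.sorted2 sessions pvDate pvTime := hperm.mem_iff.mpr hx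
  have hyL : y ∈ PySem.List.sorted2 sessions pvDate pvTime := hperm.mem_iff.mpr hy
  have hkne' : pvKey x ≠ pvKey y := by
    intro h
    unfold pvKey at h
    rw [Prod.mk.injEq] at h
    rcases hkne with h' | h' <;> exact h' (by tauto)
  rcases pv_B_repr _ none x hxL with h | ⟨u, huB, hku⟩
  · simp at h
  rcases pv_B_repr _ none y hyL with h | ⟨v, hvB, hkv⟩
  · simp at h
  have hAnodup := pv_A_map_nodup (PySem.List.sorted2 sessions pvDate pvTime) [] PySem.Set.empty
    (by intro x hx; cases hx) (by simp)
  have hBnodup : ((deduplicate_sessions_py_alt sessions).map pvJKey).Nodup := by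
    rw [← heq]; exact hAnodup
  have hjuv : pvJKey u = pvJKey v := by
    rw [pv_key_eq_jkey_eq hku, pv_key_eq_jkey_eq hkv, hjeq]
  have huv : u = v :=
    List.inj_on_of_nodup_map hBnodup
      (by unfold deduplicate_sessions_py_alt; exact huB)
      (by unfold deduplicate_sessions_py_alt; exact hvB) hjuv
  exact hkne' (by rw [← hku, ← hkv, huv])

theorem deduplicate_sessions_py_changed : Claim_changed_deduplicate_sessions_py := by
  unfold Claim_changed_deduplicate_sessions_py
  refine ⟨by decide, by decide, by decide, ?_, ?_, by decide⟩
  · unfold deduplicate_sessions_py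
    rw [pv_sorted2_W]; decide
  · unfold deduplicate_sessions_py_alt
    rw [pv_sorted2_W]; decide
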